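-- pv_equiv track=rewrite | github.com/FaultMaven/FaultMaven-Mono | tests/services/test_planning_service.py | _identify_parallel_work
-- ===== SOURCE A (Python) =====
-- from typing import Dict, List, Any, Optional, Tuple
--
-- def _identify_parallel_work(components: List[Dict[str, Any]]) -> List[List[str]]:
--     """Identify components that can be worked on in parallel"""
--     # Mock parallel work identification
--     parallel_groups = []
--
--     # Group by type for parallel execution
--     type_groups = {}
--     for comp in components:
--         comp_type = comp["type"]
--         if comp_type not in type_groups:
--             type_groups[comp_type] = []
--         type_groups[comp_type].append(comp["component_id"])
--
--     # Components of different types can often be worked on in parallel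
--     if len(type_groups) > 1:
--         parallel_groups = list(type_groups.values())
--
--     return parallel_groups
-- ===== SOURCE B (Python) =====
-- def _identify_parallel_work(components):
--     """Identify components that can be worked on in parallel"""
--     ordered = list(dict.fromkeys(c["type"] for c in components))
--     if len(ordered) <= 1:
--         return []
--     return [[c["component_id"] for c in components if c["type"] == t] for t in ordered]
-- ===== Notes on version B (the rewrite author's own statement) =====
-- stated objective: alternative
-- what changed: Replaces A's single-pass dict-of-lists grouping by first computing the distinct types in first-appearance order (dict.fromkeys) and then doing one filtering scan over the components per distinct type.
import Mathlib
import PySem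

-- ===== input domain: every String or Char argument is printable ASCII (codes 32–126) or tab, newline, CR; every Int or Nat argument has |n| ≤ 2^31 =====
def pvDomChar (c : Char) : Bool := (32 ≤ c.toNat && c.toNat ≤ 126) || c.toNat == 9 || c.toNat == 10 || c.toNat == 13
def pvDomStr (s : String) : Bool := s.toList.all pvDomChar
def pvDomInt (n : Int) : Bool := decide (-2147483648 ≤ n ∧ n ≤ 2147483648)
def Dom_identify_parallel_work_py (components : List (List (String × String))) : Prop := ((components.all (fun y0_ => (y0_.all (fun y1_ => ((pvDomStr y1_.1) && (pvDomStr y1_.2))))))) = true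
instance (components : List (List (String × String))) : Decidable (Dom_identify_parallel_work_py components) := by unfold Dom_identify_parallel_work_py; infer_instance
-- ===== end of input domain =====

-- B replaces A's single-pass dict grouping by a dedup of the types followed by one filtering
-- scan per distinct type (objective: alternative decomposition, similar cost).

-- ===== PORT A =====
-- comp["type"] / comp["component_id"] are ported as Dict.getD with default "": under
-- Pre_ (both keys present) this is exactly the Python lookup; where the key is missing
-- Python raises KeyError, which Pre_ excludes.
def identify_parallel_work_py (components : List (List (String × String))) : List (List String) :=
  let type_groups : PySem.Dict String (List String) :=
    components.foldl (fun tg comp =>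
      let comp_type := (PySem.Dict.mk comp).getD "type" ""
      let tg1 := if tg.contains comp_type then tg else tg.insert comp_type []
      tg1.modify comp_type [] (fun l => l ++ [(PySem.Dict.mk comp).getD "component_id" ""]))
      PySem.Dict.empty
  if type_groups.size > 1 then type_groups.values else []

-- ===== PORT B =====
def identify_parallel_work_py_alt (components : List (List (String × String))) : List (List String) :=
  let ordered := PySem.List.dedup (components.map (fun c => (PySem.Dict.mk c).getD "type" ""))
  if ordered.length ≤ 1 then []
  else ordered.map (fun t =>
    (components.filter (fun c => (PySem.Dict.mk c).getD "type" "" == t)).map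
      (fun c => (PySem.Dict.mk c).getD "component_id" ""))

-- ===== PRECONDITION & SPEC =====
-- Pre_ excludes components on which A raises KeyError (a dict missing "type" or
-- "component_id") and dicts with duplicate keys, where the assoc-list first-match
-- lookup and Python's last-wins dict construction diverge (an unspecifiable corner).
def Pre_identify_parallel_work_py (components : List (List (String × String))) : Prop :=
  ∀ comp ∈ components,
    (comp.map Prod.fst).Nodup ∧ "type" ∈ comp.map Prod.fst ∧ "component_id" ∈ comp.map Prod.fst
instance (components : List (List (String × String))) : Decidable (Pre_identify_parallel_work_py components) := by unfold Pre_identify_parallel_work_py; infer_instance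

def pvWitness_identify_parallel_work_py : (List (List (String × String))) :=
  [[("type", "a"), ("component_id", "1")], [("type", "b"), ("component_id", "2")]]

def Spec_identify_parallel_work_py (components : List (List (String × String))) (out : List (List String)) : Prop := out = identify_parallel_work_py_alt components
instance (components : List (List (String × String))) (out : List (List String)) : Decidable (Spec_identify_parallel_work_py components out) := by unfold Spec_identify_parallel_work_py; infer_instance

-- ===== CLAIM (what is proved, stated in full; the proofs are below) =====
def Claim_equal_identify_parallel_work_py : Prop := ∀ (components : List (List (String × String))), Dom_identify_parallel_work_py components → Pre_identify_parallel_work_py components → Spec_identify_parallel_work_py components (identify_parallel_work_py components)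

-- ===== LEMMAS AND PROOFS =====

theorem pv_step_eq (tg : PySem.Dict String (List String)) (t : String) (v : String) :
    (if tg.contains t then tg else tg.insert t []).modify t []
        (fun l => l ++ [v]) = tg.modify t [] (fun l => l ++ [v]) := by
  split
  · rfl
  · rename_i h
    have hc : tg.contains t = false := by simpa using h
    rw [PySem.Dict.modify, PySem.Dict.modify, PySem.Dict.getD_insert_self,
        PySem.Dict.insert_insert_self, PySem.Dict.getD_of_not_contains tg [] hc]


theorem pv_main (components : List (List (String × String))) : identify_parallel_work_py components = identify_parallel_work_py_alt components := by
  unfold identify_parallel_work_py identify_parallel_work_py_alt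
  simp only [pv_step_eq]
  set key : List (String × String) → String := fun c => (PySem.Dict.mk c).getD "type" "" with hkeydef
  set val : List (String × String) → String := fun c => (PySem.Dict.mk c).getD "component_id" "" with hvaldef
  set G := components.foldl (fun tg comp => tg.modify (key comp) [] (fun l => l ++ [val comp])) PySem.Dict.empty with hG
  have hkeys : G.keys = PySem.List.dedup (components.map key) := by
    rw [hG, PySem.Dict.keys_foldl_modify_key components key [] (fun _ c => fun l => l ++ [val c])]
    simp [PySem.Dict.keys, PySem.Dict.empty, PySem.Set.update_nil_left]
  have hnodup : G.keys.Nodup := by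
    rw [hkeys]; exact PySem.List.nodup_dedup _
  have hget : ∀ k, G.getD k [] = (components.filter (fun c => key c == k)).map val := by
    intro k
    have hm : G = (components.map (fun c => (key c, val c))).foldl
        (fun d p => d.modify p.1 [] (fun x => x ++ [p.2])) PySem.Dict.empty := by
      rw [hG, List.foldl_map]
    rw [hm, PySem.Dict.getD_foldl_modify_append, List.filter_map, List.map_map]
    simp [Function.comp_def, PySem.Dict.getD_empty]
  have hvals : G.values = G.keys.map (fun k => G.getD k []) :=
    PySem.Dict.values_eq_map_keys G hnodup []
  have hsize : G.size = G.keys.length := by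
    simp [PySem.Dict.size, PySem.Dict.keys]
  rw [hvals, hsize, hkeys]
  by_cases hlen : (PySem.List.dedup (components.map key)).length ≤ 1
  · rw [if_neg (by omega), if_pos hlen]
  · rw [if_pos (by omega), if_neg hlen]
    apply List.map_congr_left
    intro t _
    rw [hget]

-- ===== VERDICT (by name: the statement is the Claim_ definition above) =====
theorem identify_parallel_work_py_spec : Claim_equal_identify_parallel_work_py := by
  intro components _ _
  exact pv_main components
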